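-- pv_equiv track=rewrite | github.com/reykjavik-university/2020-3-T-111-PROG | exams/final/sum_of/sum_rows_cols.py | row_sum_same
-- ===== SOURCE A (Python) =====
-- def row_sum_same(matrix):
--     '''Returns the sum of the elements in each row of the matrix if the sum is the same, else 0'''
--     last_sum = 0
--     first_row = True
--
--     for row in matrix:
--         sum_row = sum(row)
--         if first_row:
--             first_row = False
--         elif sum_row != last_sum:
--             return 0
--         last_sum = sum_row
--
--     return last_sum
-- ===== SOURCE B (Python) =====
-- def row_sum_same(matrix):
--     '''Returns the sum of the elements in each row of the matrix if the sum is the same, else 0'''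
--     sums = [sum(row) for row in matrix]
--     if not sums:
--         return 0
--     return sums[0] if len(set(sums)) == 1 else 0
-- ===== Notes on version B (the rewrite author's own statement) =====
-- stated objective: simpler
-- what changed: Replaces A's single-pass stateful loop (first-row flag, running last_sum, early return) with a two-phase decomposition: materialise all row sums with a comprehension, then test uniformity via len(set(sums)) == 1.
import Mathlib
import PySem

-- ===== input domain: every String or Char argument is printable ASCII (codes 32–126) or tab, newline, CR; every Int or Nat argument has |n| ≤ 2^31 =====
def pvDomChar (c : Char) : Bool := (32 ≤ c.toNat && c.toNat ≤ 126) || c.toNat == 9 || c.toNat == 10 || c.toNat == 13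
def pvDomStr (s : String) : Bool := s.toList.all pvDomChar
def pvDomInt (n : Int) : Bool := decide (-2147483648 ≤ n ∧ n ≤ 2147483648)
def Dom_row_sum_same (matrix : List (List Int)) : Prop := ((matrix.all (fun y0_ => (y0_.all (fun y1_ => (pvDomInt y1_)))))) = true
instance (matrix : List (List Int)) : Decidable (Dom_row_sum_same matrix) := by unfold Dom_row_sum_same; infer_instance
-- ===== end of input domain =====

-- B replaces A's single-pass stateful loop with a two-phase decomposition (map row sums, then a set-based uniformity test); objective: simpler, same cost.


-- ===== PORT A =====
-- A's loop: state (last_sum, first_row), early return 0 on mismatch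
def rowSumLoopA : List (List Int) → Int → Bool → Int
  | [], last_sum, _ => last_sum
  | row :: rest, last_sum, first_row =>
    let sum_row := row.sum
    if first_row then rowSumLoopA rest sum_row false
    else if sum_row ≠ last_sum then 0
    else rowSumLoopA rest sum_row false

def row_sum_same (matrix : List (List Int)) : Int :=
  rowSumLoopA matrix 0 true

-- ===== PORT B =====
def row_sum_same_alt (matrix : List (List Int)) : Int :=
  let sums := matrix.map (fun row => row.sum)
  match sums with
  | [] => 0
  | s :: _ => if (PySem.Set.ofList sums).length = 1 then s else 0

-- ===== PRECONDITION & SPEC =====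
def Spec_row_sum_same (matrix : List (List Int)) (out : Int) : Prop := out = row_sum_same_alt matrix
instance (matrix : List (List Int)) (out : Int) : Decidable (Spec_row_sum_same matrix out) := by unfold Spec_row_sum_same; infer_instance

-- ===== CLAIM (what is proved, stated in full; the proofs are below) =====
def Claim_equal_row_sum_same : Prop := ∀ (matrix : List (List Int)), Dom_row_sum_same matrix → Spec_row_sum_same matrix (row_sum_same matrix)

-- ===== LEMMAS AND PROOFS =====

-- ===== VERDICT (by name: the statement is the Claim_ definition above) =====
-- Set.add never shrinks the accumulator
theorem length_le_foldl_add (l : List Int) (s : List Int) :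
    s.length ≤ (l.foldl PySem.Set.add s).length := by
  induction l generalizing s with
  | nil => simp
  | cons x xs ih =>
    refine le_trans ?_ (ih (PySem.Set.add s x))
    simp [PySem.Set.add]
    split <;> simp

-- len(set(s::rest)) = 1  ↔  every element of rest equals s
theorem set_len_one (rest : List Int) (s : Int) :
    ((rest.foldl PySem.Set.add [s]).length = 1) ↔ (∀ x ∈ rest, x = s) := by
  induction rest with
  | nil => simp
  | cons x xs ih =>
    by_cases hx : x = s
    · subst hx
      simp [List.foldl_cons, PySem.Set.add, PySem.Set.contains, ih]
    · constructor
      · intro h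
        exfalso
        have h2 : (2 : ℕ) ≤ ((x :: xs).foldl PySem.Set.add [s]).length := by
          have := length_le_foldl_add xs [s, x]
          simpa [List.foldl_cons, PySem.Set.add, PySem.Set.contains, hx] using this
        omega
      · intro h; exact absurd (h x (by simp)) hx

-- A's tail loop computes "last_sum if all remaining row sums equal it, else 0"
theorem rowSumLoopA_false (rs : List (List Int)) (last : Int) :
    rowSumLoopA rs last false =
      if ∀ r ∈ rs, r.sum = last then last else 0 := by
  induction rs generalizing last with
  | nil => simp [rowSumLoopA]
  | cons r rest ih =>
    by_cases hr : r.sum = last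
    · simp [rowSumLoopA, hr, ih]
    · simp [rowSumLoopA, hr]

theorem row_sum_same_spec : Claim_equal_row_sum_same := by
  intro matrix _
  unfold Spec_row_sum_same row_sum_same row_sum_same_alt
  cases matrix with
  | nil => simp [rowSumLoopA]
  | cons r rest =>
    simp only [rowSumLoopA, List.map_cons]
    rw [rowSumLoopA_false]
    have hfold : PySem.Set.ofList (r.sum :: rest.map (fun row => row.sum)) =
        (rest.map (fun row => row.sum)).foldl PySem.Set.add [r.sum] := by
      simp [PySem.Set.ofList_eq_foldl, PySem.Set.add, PySem.Set.contains]
    have hiff := set_len_one (rest.map (fun row => row.sum)) r.sum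
    simp only [List.forall_mem_map] at hiff
    simp only [hfold, reduceIte]
    by_cases h : ∀ r1 ∈ rest, r1.sum = r.sum
    · rw [if_pos h, if_pos (hiff.mpr h)]
    · rw [if_neg h, if_neg (fun hl => h (hiff.mp hl))]
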